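-- pv_equiv track=rewrite | github.com/frothywater/melody-pretrain | melody_pretrain/ngram.py | transpose_pitches
-- ===== SOURCE A (Python) =====
-- def transpose_pitches(pitches: tuple):
--     """Transpose pitches to a key where there are least accidentals.
--     This is utility function for visualize n-grams."""
--     accidental_notes = [1, 3, 6, 8, 10]
--     results = []
--     for key in range(12):
--         pc = [(note + key) % 12 for note in pitches]
--         accidentals = sum(1 for note in pc if note in accidental_notes)
--         results.append((key, accidentals))
--     key, _ = min(results, key=lambda x: x[1])
--     return tuple((pc + key) % 12 for pc in pitches)
-- ===== SOURCE B (Python) =====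
-- def transpose_pitches(pitches: tuple):
--     """Transpose pitches to a key where there are least accidentals.
--     One pass over the pitches scattering into a 12-bin table, then an argmin."""
--     counts = [0] * 12
--     for note in pitches:
--         for a in (1, 3, 6, 8, 10):
--             counts[(a - note) % 12] += 1
--     key = counts.index(min(counts))
--     return tuple((p + key) % 12 for p in pitches)
-- ===== Notes on version B (the rewrite author's own statement) =====
-- stated objective: faster
-- what changed: Instead of A's 12 full rescans of the pitch list (one transposed copy + membership count per key), B makes a single pass over the pitches scattering each note's five accidental-causing keys into a 12-bin table, then takes the argmin of the table (counts.index(min(counts)) reproduces A's lowest-key tie-break).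
import Mathlib
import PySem

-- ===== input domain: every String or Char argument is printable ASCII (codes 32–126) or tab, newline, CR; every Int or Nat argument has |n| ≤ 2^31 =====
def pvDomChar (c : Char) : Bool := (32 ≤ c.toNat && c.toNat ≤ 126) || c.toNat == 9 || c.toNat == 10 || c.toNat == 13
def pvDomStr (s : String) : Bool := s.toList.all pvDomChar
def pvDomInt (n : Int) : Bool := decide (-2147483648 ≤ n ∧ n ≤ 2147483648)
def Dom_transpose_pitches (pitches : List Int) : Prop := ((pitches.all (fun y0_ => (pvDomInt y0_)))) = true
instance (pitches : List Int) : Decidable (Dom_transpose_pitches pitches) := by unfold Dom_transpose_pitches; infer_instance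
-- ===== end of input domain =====

-- B replaces A's 12 rescans of the pitch list by one scatter pass into a 12-bin
-- accidental table followed by an argmin over the bins (same result, one pass over pitches).


-- ===== PORT A =====
-- accidental_notes = [1, 3, 6, 8, 10]
def pvAccNotes : List Int := [1, 3, 6, 8, 10]

def transpose_pitches (pitches : List Int) : List Int :=
  let results : List (Int × Int) :=
    (PySem.List.pyRange 0 12 1).map (fun key =>
      let pc := pitches.map (fun note => PySem.Int.mod (note + key) 12)
      let accidentals : Int := ((pc.filter (fun note => pvAccNotes.contains note)).length : Int)
      (key, accidentals))
  -- results always has 12 elements, so Python's min never raises and the default is never taken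
  let key := ((PySem.List.min? results (fun x => x.2)).getD (0, 0)).1
  pitches.map (fun pc => PySem.Int.mod (pc + key) 12)

-- ===== PORT B =====
def pvAccOffsets : List Int := [1, 3, 6, 8, 10]

def transpose_pitches_alt (pitches : List Int) : List Int :=
  let counts : List Int :=
    pitches.foldl (fun c note =>
      pvAccOffsets.foldl (fun c a =>
        -- counts[(a - note) % 12] += 1 ; the Python index (a - note) % 12 is in [0, 12), so .toNat is exact
        let i := (PySem.Int.mod (a - note) 12).toNat
        c.set i (c.getD i 0 + 1)) c)
      (List.replicate 12 (0 : Int))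
  -- counts always has 12 elements, so min()/index() never raise and the defaults are never taken
  let m := (PySem.List.min? counts (fun x => x)).getD 0
  let key : Int := ((PySem.List.index? counts m).getD 0 : Nat)
  pitches.map (fun p => PySem.Int.mod (p + key) 12)

-- ===== PRECONDITION & SPEC =====
def Spec_transpose_pitches (pitches : List Int) (out : List Int) : Prop := out = transpose_pitches_alt pitches
instance (pitches : List Int) (out : List Int) : Decidable (Spec_transpose_pitches pitches out) := by unfold Spec_transpose_pitches; infer_instance

-- ===== CLAIM (what is proved, stated in full; the proofs are below) =====
def Claim_equal_transpose_pitches : Prop := ∀ (pitches : List Int), Dom_transpose_pitches pitches → Spec_transpose_pitches pitches (transpose_pitches pitches)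

-- ===== LEMMAS AND PROOFS =====

-- the per-key accidental count both programs compute
def pvCnt (pitches : List Int) (k : Nat) : Int :=
  ((pitches.filter (fun p => pvAccNotes.contains (PySem.Int.mod (p + (k : Int)) 12))).length : Int)

theorem pvCnt_cons (p : Int) (l : List Int) (k : Nat) :
    pvCnt (p :: l) k =
      (if pvAccNotes.contains (PySem.Int.mod (p + (k : Int)) 12) then 1 else 0) + pvCnt l k := by
  simp only [pvCnt, List.filter_cons]
  split <;> simp <;> omega

-- cons recurrence for Python's min(·, key=…): the FIRST minimal element wins
theorem pv_min_cons {α : Type} (key : α → Int) (q : α) (ps : List α) :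
    PySem.List.min? (q :: ps) key =
      some (match PySem.List.min? ps key with
            | none => q
            | some r => if key r < key q then r else q) := by
  induction ps generalizing q with
  | nil => simp [PySem.List.min?]
  | cons p ps ih =>
    have h : PySem.List.min? (q :: p :: ps) key
        = PySem.List.min? ((if key p < key q then p else q) :: ps) key := by
      by_cases hc : key p < key q <;> simp [PySem.List.min?, hc]
    rw [h, ih, ih]
    rcases hm : PySem.List.min? ps key with _ | r <;>
      simp only <;> split_ifs <;> first | rfl | (exfalso; omega)

-- argmin correspondence: min over (index, value) pairs, and index(min(·)) pick the same slot
theorem pv_trip (vs : List Int) (s : Int) (h : vs ≠ []) :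
    ∃ (j : Nat) (m : Int),
      PySem.List.min? vs (fun x => x) = some m ∧
      PySem.List.index? vs m = some j ∧
      PySem.List.min? (PySem.List.enumerate vs s) (fun p => p.2) = some ((s + (j : Int)), m) := by
  induction vs generalizing s with
  | nil => exact absurd rfl h
  | cons v vs ih =>
    by_cases hv : vs = []
    · subst hv
      refine ⟨0, v, ?_, ?_, ?_⟩
      · simp [PySem.List.min?]
      · exact PySem.List.index?_cons_self v []
      · simp [PySem.List.enumerate_cons, PySem.List.enumerate_nil, PySem.List.min?]
    · obtain ⟨j, m, h1, h2, h3⟩ := ih (s + 1) hv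
      rw [PySem.List.enumerate_cons]
      rw [pv_min_cons (fun x => x) v vs, h1]
      rw [pv_min_cons (fun p => p.2) (s, v) _, h3]
      by_cases hm : m < v
      · refine ⟨j + 1, m, ?_, ?_, ?_⟩
        · simp [hm]
        · rw [PySem.List.index?_cons_of_ne vs (by omega : v ≠ m), h2]; rfl
        · simp only [hm, if_pos]
          congr 2
          push_cast
          ring
      · refine ⟨0, v, ?_, ?_, ?_⟩
        · simp [hm]
        · exact PySem.List.index?_cons_self v vs
        · simp [hm]

-- incrementing one bin of a 12-bin table written as a map over range 12
theorem pv_bump (g : Nat → Int) (j : Nat) (hj : j < 12) :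
    (((List.range 12).map g).set j (((List.range 12).map g).getD j 0 + 1)) =
      (List.range 12).map (fun k => g k + if k = j then 1 else 0) := by
  rw [PySem.List.getD_map_range g 12 j 0 hj]
  apply List.ext_getElem
  · simp
  · intro i h1 h2
    simp only [List.getElem_set, List.getElem_map, List.getElem_range] at *
    by_cases hij : i = j
    · subst hij; simp
    · simp [hij, Ne.symm hij]

-- one pitch's scatter over the five accidental offsets = the per-key indicator
theorem pv_step (g : Nat → Int) (p : Int) :
    pvAccOffsets.foldl (fun c a =>
        let i := (PySem.Int.mod (a - p) 12).toNat
        c.set i (c.getD i 0 + 1)) ((List.range 12).map g)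
    = (List.range 12).map
        (fun k => g k + if pvAccNotes.contains (PySem.Int.mod (p + (k : Int)) 12) then 1 else 0) := by
  have hmod : ∀ a : Int, PySem.Int.mod (a - p) 12 = (a - p) % 12 := fun a =>
    PySem.Int.mod_eq_emod_of_pos (by norm_num)
  have hmod2 : ∀ k : Nat, PySem.Int.mod (p + (k : Int)) 12 = (p + (k : Int)) % 12 := fun k =>
    PySem.Int.mod_eq_emod_of_pos (by norm_num)
  have hlt : ∀ a : Int, ((a - p) % 12).toNat < 12 := by intro a; omega
  simp only [pvAccOffsets, List.foldl_cons, List.foldl_nil, hmod]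
  rw [pv_bump g _ (hlt 1), pv_bump _ _ (hlt 3), pv_bump _ _ (hlt 6),
      pv_bump _ _ (hlt 8), pv_bump _ _ (hlt 10)]
  apply List.map_congr_left
  intro k hk
  have hk12 : k < 12 := List.mem_range.mp hk
  have hiff : ∀ a : Int, 0 ≤ a → a < 12 → ((k = ((a - p) % 12).toNat) ↔ ((p + (k : Int)) % 12 = a)) := by
    intro a ha hb
    omega
  simp only [hmod2, pvAccNotes, List.contains_cons, List.contains_nil,
    Bool.or_eq_true, beq_iff_eq, Bool.false_eq_true, or_false,
    hiff 1 (by norm_num) (by norm_num), hiff 3 (by norm_num) (by norm_num),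
    hiff 6 (by norm_num) (by norm_num), hiff 8 (by norm_num) (by norm_num),
    hiff 10 (by norm_num) (by norm_num)]
  split_ifs <;> omega

-- B's whole scatter loop computes the 12 per-key accidental counts
theorem pv_counts_aux (pitches : List Int) (g : Nat → Int) :
    pitches.foldl (fun c note =>
        pvAccOffsets.foldl (fun c a =>
          let i := (PySem.Int.mod (a - note) 12).toNat
          c.set i (c.getD i 0 + 1)) c) ((List.range 12).map g)
    = (List.range 12).map (fun k => g k + pvCnt pitches k) := by
  induction pitches generalizing g with
  | nil => simp [pvCnt]
  | cons p l ih =>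
    rw [List.foldl_cons, pv_step g p, ih]
    apply List.map_congr_left
    intro k _
    rw [pvCnt_cons]
    omega

theorem pv_counts (pitches : List Int) :
    pitches.foldl (fun c note =>
        pvAccOffsets.foldl (fun c a =>
          let i := (PySem.Int.mod (a - note) 12).toNat
          c.set i (c.getD i 0 + 1)) c) (List.replicate 12 (0 : Int))
    = (List.range 12).map (fun k => pvCnt pitches k) := by
  have h0 : List.replicate 12 (0 : Int) = (List.range 12).map (fun _ => (0 : Int)) := by
    simp [List.map_const']
  rw [h0, pv_counts_aux]
  simp

-- A's results list is exactly the enumeration of B's counts table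
theorem pv_results_eq (pitches : List Int) :
    (PySem.List.pyRange 0 12 1).map (fun key =>
        (key, (((pitches.map (fun note => PySem.Int.mod (note + key) 12)).filter
                  (fun note => pvAccNotes.contains note)).length : Int)))
    = PySem.List.enumerate ((List.range 12).map (fun k => pvCnt pitches k)) 0 := by
  rw [PySem.List.enumerate_eq_map_pyRange _ (0 : Int)]
  have hlen : PySem.List.len ((List.range 12).map (fun k => pvCnt pitches k)) = 12 := by
    simp [PySem.List.len]
  rw [hlen]
  apply List.map_congr_left
  intro j hj
  have hj' : 0 ≤ j ∧ j < 12 := (PySem.List.mem_pyRange_one).mp hj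
  have h1 : PySem.List.pyGetD ((List.range 12).map (fun k => pvCnt pitches k)) j 0
      = pvCnt pitches j.toNat := by
    rw [PySem.List.pyGetD_of_nonneg _ _ hj'.1, PySem.List.getD_map_range _ 12 _ _ (by omega)]
  rw [h1]
  have hcast : ((j.toNat : Int)) = j := by omega
  simp only [pvCnt, hcast, List.filter_map, List.length_map]
  rfl

-- ===== VERDICT (by name: the statement is the Claim_ definition above) =====
theorem transpose_pitches_spec : Claim_equal_transpose_pitches := by
  intro pitches _
  unfold Spec_transpose_pitches transpose_pitches transpose_pitches_alt
  simp only
  rw [pv_counts pitches]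
  have hne : (List.range 12).map (fun k => pvCnt pitches k) ≠ [] := by simp
  obtain ⟨j, m, h1, h2, h3⟩ := pv_trip ((List.range 12).map (fun k => pvCnt pitches k)) 0 hne
  rw [pv_results_eq pitches, h3, h1]
  simp only [Option.getD_some]
  rw [h2]
  simp
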